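-- pv_equiv track=rewrite | github.com/narek88888/Homeworks | Tnayinner21/tnayin21-6.py | the_highest_student_score_founder
-- ===== SOURCE A (Python) =====
-- def the_highest_student_score_founder(sequence):
--
--
--
--     the_highest_score = sequence[0][1]
--     the_highest_student_with_score = sequence[0]
--
--     for i in sequence:
--
--         if i[1] > the_highest_score:
--             the_highest_score = i[1]
--             the_highest_student_with_score = i
--
--     return  the_highest_student_with_score
-- ===== SOURCE B (Python) =====
-- def the_highest_student_score_founder(sequence):
--     return sorted(sequence, key=lambda s: s[1], reverse=True)[0]
-- ===== Notes on version B (the rewrite author's own statement) =====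
-- stated objective: idiomatic
-- what changed: Replaces the manual max-tracking loop over the sequence with a stable descending sort by score and taking the first element; stability with reverse=True preserves A's first-seen-max tie-breaking.
import Mathlib
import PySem

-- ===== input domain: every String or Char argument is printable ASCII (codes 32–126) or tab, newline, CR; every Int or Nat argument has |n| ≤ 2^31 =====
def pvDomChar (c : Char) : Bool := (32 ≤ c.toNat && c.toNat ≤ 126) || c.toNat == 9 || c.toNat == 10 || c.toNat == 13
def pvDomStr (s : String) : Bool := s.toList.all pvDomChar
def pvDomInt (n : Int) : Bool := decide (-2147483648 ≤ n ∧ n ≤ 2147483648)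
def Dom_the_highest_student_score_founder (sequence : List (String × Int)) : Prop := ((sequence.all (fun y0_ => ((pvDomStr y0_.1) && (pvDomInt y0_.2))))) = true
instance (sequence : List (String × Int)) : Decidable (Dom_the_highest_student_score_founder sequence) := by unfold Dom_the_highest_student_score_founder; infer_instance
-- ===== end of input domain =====

-- B replaces A's manual max-tracking loop by a stable descending sort by score and taking the first
-- element (idiomatic; same result incl. first-seen tie-breaking); Pre_ excludes the empty list, where A raises IndexError.


-- ===== PORT A =====
-- literal transliteration of A: read sequence[0], then scan the whole sequence keeping
-- (the_highest_score, the_highest_student_with_score), updating on a strict '>'.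
def the_highest_student_score_founder (sequence : List (String × Int)) : String × Int :=
  match PySem.List.pyGet? sequence 0 with
  | none => ("", 0)  -- sequence[0] raises IndexError; excluded by Pre_
  | some s0 =>
    (sequence.foldl
      (fun st i => if i.2 > st.1 then (i.2, i) else st)
      (s0.2, s0)).2

-- ===== PORT B =====
-- literal transliteration of B: sorted(sequence, key=lambda s: s[1], reverse=True)[0]
def the_highest_student_score_founder_alt (sequence : List (String × Int)) : String × Int :=
  (PySem.List.pyGet? (PySem.List.sorted sequence (fun s => s.2) true) 0).getD ("", 0)

-- ===== PRECONDITION & SPEC =====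
-- A indexes sequence[0]: the empty list (IndexError) is excluded.
def Pre_the_highest_student_score_founder (sequence : List (String × Int)) : Prop := sequence ≠ []
instance (sequence : List (String × Int)) : Decidable (Pre_the_highest_student_score_founder sequence) := by unfold Pre_the_highest_student_score_founder; infer_instance
def pvWitness_the_highest_student_score_founder : (List (String × Int)) := [("ann", 5), ("bob", 7), ("cy", 7)]

def Spec_the_highest_student_score_founder (sequence : List (String × Int)) (out : String × Int) : Prop := out = the_highest_student_score_founder_alt sequence
instance (sequence : List (String × Int)) (out : String × Int) : Decidable (Spec_the_highest_student_score_founder sequence out) := by unfold Spec_the_highest_student_score_founder; infer_instance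

-- ===== CLAIM (what is proved, stated in full; the proofs are below) =====
def Claim_equal_the_highest_student_score_founder : Prop := ∀ (sequence : List (String × Int)), Dom_the_highest_student_score_founder sequence → Pre_the_highest_student_score_founder sequence → Spec_the_highest_student_score_founder sequence (the_highest_student_score_founder sequence)

-- ===== LEMMAS AND PROOFS =====

-- the simple "keep the first strict maximum" fold both sides reduce to
def pvBest (b : String × Int) (xs : List (String × Int)) : String × Int :=
  xs.foldl (fun b i => if i.2 > b.2 then i else b) b

-- A's paired state (score, student) always satisfies score = student.2
theorem pvA_fold_collapse (xs : List (String × Int)) (b : String × Int) :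
    xs.foldl (fun st i => if i.2 > st.1 then (i.2, i) else st) (b.2, b)
      = ((pvBest b xs).2, pvBest b xs) := by
  induction xs generalizing b with
  | nil => rfl
  | cons x xs ih =>
    simp only [List.foldl_cons, pvBest]
    by_cases h : x.2 > b.2 <;> simp [h, ih, pvBest]

-- head of the reverse-stable insertion sort accumulator is the running first strict maximum
theorem pvFoldl_insertBy_head (xs : List (String × Int)) (b : String × Int) (acc : List (String × Int)) :
    ∃ t, xs.foldl (fun acc x => PySem.List.insertBy (fun a c => decide ((fun s : String × Int => s.2) c < (fun s : String × Int => s.2) a)) x acc) (b :: acc)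
      = pvBest b xs :: t := by
  induction xs generalizing b acc with
  | nil => exact ⟨acc, rfl⟩
  | cons x xs ih =>
    simp only [List.foldl_cons, PySem.List.insertBy]
    by_cases h : x.2 > b.2
    · simp only [show decide (b.2 < x.2) = true from by simpa using h]
      obtain ⟨t, ht⟩ := ih x (b :: acc)
      exact ⟨t, by simpa [pvBest, h] using ht⟩
    · simp only [show decide (b.2 < x.2) = false from by simpa using h]
      obtain ⟨t, ht⟩ := ih b (PySem.List.insertBy (fun a c => decide (c.2 < a.2)) x acc)
      exact ⟨t, by simpa [pvBest, h] using ht⟩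

theorem pvSorted_rev_head (s0 : String × Int) (rest : List (String × Int)) :
    ∃ t, PySem.List.sorted (s0 :: rest) (fun s => s.2) true = pvBest s0 rest :: t := by
  rw [PySem.List.sorted_rev_eq_foldl_insertBy]
  simpa using pvFoldl_insertBy_head rest s0 []

-- ===== VERDICT (by name: the statement is the Claim_ definition above) =====
theorem the_highest_student_score_founder_spec : Claim_equal_the_highest_student_score_founder := by
  intro sequence _ hpre
  obtain ⟨s0, rest, rfl⟩ := List.exists_cons_of_ne_nil hpre
  obtain ⟨t, ht⟩ := pvSorted_rev_head s0 rest
  unfold Spec_the_highest_student_score_founder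
  unfold the_highest_student_score_founder the_highest_student_score_founder_alt
  rw [ht]
  have h0 : ¬ (s0.2 > s0.2) := lt_irrefl _
  simp [PySem.List.pyGet?, PySem.List.pyIdx?, h0, pvA_fold_collapse]
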